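-- pv_equiv track=rewrite | github.com/oneaiguru/ai-migration | projects/agentos/scripts/tools/proxy_cost_compare.py | _group_costs
-- ===== SOURCE A (Python) =====
-- from typing import Any, Dict, Iterable, Tuple
--
-- def _is_glm(evt: Dict[str, Any]) -> bool:
--     model = str(evt.get("model") or "").lower()
--     lane = str(evt.get("lane") or "").lower()
--     return ("glm" in model) or ("glm" in lane) or model.startswith("z.")
--
-- def _to_int(value: Any) -> int:
--     try:
--         return int(value)
--     except Exception:
--         return 0
--
-- def _group_costs(events: Iterable[Dict[str, Any]]) -> Dict[str, Tuple[int, int]]: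
--     # rid -> (baseline_tokens, glm_tokens)
--     groups: Dict[str, Tuple[int, int]] = {}
--     for evt in events:
--         rid = str(evt.get("rid") or "")
--         if not rid:
--             # Ignore events without a feature/rid id
--             continue
--         total_tokens = _to_int(evt.get("input_tokens")) + _to_int(evt.get("output_tokens"))
--         base, glm = groups.get(rid, (0, 0))
--         if _is_glm(evt):
--             glm += total_tokens
--         else:
--             base += total_tokens
--         groups[rid] = (base, glm)
--     return groups
-- ===== SOURCE B (Python) =====
-- from typing import Any, Dict, Iterable, List, Tuple
--
-- def _is_glm(evt: Dict[str, Any]) -> bool: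
--     model = str(evt.get("model") or "").lower()
--     lane = str(evt.get("lane") or "").lower()
--     return ("glm" in model) or ("glm" in lane) or model.startswith("z.")
--
-- def _to_int(value: Any) -> int:
--     try:
--         return int(value)
--     except Exception:
--         return 0
--
-- def _group_costs(events: Iterable[Dict[str, Any]]) -> Dict[str, Tuple[int, int]]:
--     # First pass: index rid -> its events (skipping empty rids); second pass: sum per group.
--     index: Dict[str, List[Dict[str, Any]]] = {}
--     for evt in events:
--         rid = str(evt.get("rid") or "")
--         if rid:
--             index.setdefault(rid, []).append(evt)
--     return {
--         rid: (
--             sum(_to_int(e.get("input_tokens")) + _to_int(e.get("output_tokens"))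
--                 for e in evs if not _is_glm(e)),
--             sum(_to_int(e.get("input_tokens")) + _to_int(e.get("output_tokens"))
--                 for e in evs if _is_glm(e)),
--         )
--         for rid, evs in index.items()
--     }
-- ===== Notes on version B (the rewrite author's own statement) =====
-- stated objective: alternative
-- what changed: Replaces A's single pass that accumulates a running (base, glm) pair per rid in the result dict by a two-pass group-then-sum shape: first index rid -> list of its events, then for each group compute the baseline and glm sums separately.
import Mathlib
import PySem

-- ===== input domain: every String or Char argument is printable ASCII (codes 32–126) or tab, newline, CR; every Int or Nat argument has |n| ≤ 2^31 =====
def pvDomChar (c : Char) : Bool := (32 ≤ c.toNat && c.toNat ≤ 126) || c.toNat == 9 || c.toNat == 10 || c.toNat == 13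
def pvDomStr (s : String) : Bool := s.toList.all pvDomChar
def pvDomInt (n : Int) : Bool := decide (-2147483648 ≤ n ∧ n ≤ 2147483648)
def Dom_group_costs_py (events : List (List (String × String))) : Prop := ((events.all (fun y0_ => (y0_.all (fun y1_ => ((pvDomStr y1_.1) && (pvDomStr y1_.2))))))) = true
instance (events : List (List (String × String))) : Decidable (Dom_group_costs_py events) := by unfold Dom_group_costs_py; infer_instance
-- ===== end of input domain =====

-- B replaces A's single accumulating pass by an index-first two-pass (group events per rid, then
-- sum each group's baseline/glm tokens separately); same cost, different decomposition.
-- Shared helpers of the Python module (_is_glm, _to_int, evt.get, rid extraction), used verbatim by both ports: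

def pvGet (e : List (String × String)) (k : String) : Option String :=
  (PySem.Dict.mk e).get? k

-- _to_int: int(value) with every exception mapped to 0 (int(None) raises, so none -> 0)
def pvToInt : Option String → Int
  | none => 0
  | some s => (PySem.Int.ofStr? s).getD 0

def pvIsGlm (e : List (String × String)) : Bool :=
  let model := PySem.Str.lower ((pvGet e "model").getD "")
  let lane := PySem.Str.lower ((pvGet e "lane").getD "")
  PySem.Str.isIn "glm" model || PySem.Str.isIn "glm" lane || PySem.Str.startswith model "z."

-- str(evt.get("rid") or ""): None and "" both give ""
def pvRid (e : List (String × String)) : String := (pvGet e "rid").getD ""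

def pvTot (e : List (String × String)) : Int :=
  pvToInt (pvGet e "input_tokens") + pvToInt (pvGet e "output_tokens")

-- ===== PORT A =====
def group_costs_py (events : List (List (String × String))) : List (String × Int × Int) :=
  (events.foldl
    (fun (groups : PySem.Dict String (Int × Int)) evt =>
      if pvRid evt = "" then groups
      else
        let total := pvTot evt
        let p := groups.getD (pvRid evt) (0, 0)
        groups.insert (pvRid evt)
          (if pvIsGlm evt then (p.1, p.2 + total) else (p.1 + total, p.2)))
    PySem.Dict.empty).items

-- ===== PORT B =====
def group_costs_py_alt (events : List (List (String × String))) : List (String × Int × Int) :=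
  let index := events.foldl
    (fun (d : PySem.Dict String (List (List (String × String)))) evt =>
      if pvRid evt = "" then d else d.modify (pvRid evt) [] (· ++ [evt]))
    PySem.Dict.empty
  index.items.map (fun g =>
    (g.1, ((g.2.filter (fun e => !pvIsGlm e)).map pvTot).sum,
          ((g.2.filter (fun e => pvIsGlm e)).map pvTot).sum))

-- ===== PRECONDITION & SPEC =====
def Spec_group_costs_py (events : List (List (String × String))) (out : List (String × Int × Int)) : Prop := out = group_costs_py_alt events
instance (events : List (List (String × String))) (out : List (String × Int × Int)) : Decidable (Spec_group_costs_py events out) := by unfold Spec_group_costs_py; infer_instance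

-- ===== CLAIM (what is proved, stated in full; the proofs are below) =====
def Claim_equal_group_costs_py : Prop := ∀ (events : List (List (String × String))), Dom_group_costs_py events → Spec_group_costs_py events (group_costs_py events)

-- ===== LEMMAS AND PROOFS =====

-- A's per-key running pair: getD of A's fold is the pair-fold over exactly this key's events
theorem pv_getD_foldl_insert (l : List (List (String × String)))
    (d : PySem.Dict String (Int × Int)) (k : String) :
    (l.foldl
      (fun groups evt =>
        groups.insert (pvRid evt)
          (if pvIsGlm evt then ((groups.getD (pvRid evt) (0, 0)).1, (groups.getD (pvRid evt) (0, 0)).2 + pvTot evt)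
           else ((groups.getD (pvRid evt) (0, 0)).1 + pvTot evt, (groups.getD (pvRid evt) (0, 0)).2))) d).getD k (0, 0)
    = (l.filter (fun e => pvRid e = k)).foldl
        (fun p e => if pvIsGlm e then (p.1, p.2 + pvTot e) else (p.1 + pvTot e, p.2))
        (d.getD k (0, 0)) := by
  induction l generalizing d with
  | nil => rfl
  | cons e l ih =>
    simp only [List.foldl_cons, List.filter_cons]
    by_cases h : pvRid e = k
    · simp [h, ih, PySem.Dict.getD_insert]
    · simp only [h, decide_false, if_neg h]
      rw [ih, PySem.Dict.getD_insert]
      simp [Ne.symm h]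

-- B's index: getD of the modify-fold collects exactly this key's events, in order
theorem pv_getD_foldl_modify (l : List (List (String × String)))
    (d : PySem.Dict String (List (List (String × String)))) (k : String) :
    (l.foldl (fun d evt => d.modify (pvRid evt) [] (· ++ [evt])) d).getD k []
    = d.getD k [] ++ l.filter (fun e => pvRid e = k) := by
  induction l generalizing d with
  | nil => simp
  | cons e l ih =>
    simp only [List.foldl_cons, List.filter_cons]
    by_cases h : pvRid e = k
    · simp [h, ih]
    · rw [ih, PySem.Dict.getD_modify]
      simp [h, Ne.symm h]

-- the pair-fold computes the two filtered sums
theorem pv_pairfold_eq_sums (evs : List (List (String × String))) (b g : Int) :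
    evs.foldl (fun p e => if pvIsGlm e then (p.1, p.2 + pvTot e) else (p.1 + pvTot e, p.2)) (b, g)
    = (b + ((evs.filter (fun e => !pvIsGlm e)).map pvTot).sum,
       g + ((evs.filter (fun e => pvIsGlm e)).map pvTot).sum) := by
  induction evs generalizing b g with
  | nil => simp
  | cons e l ih =>
    by_cases h : pvIsGlm e
    · simp [h, ih]; ring
    · simp [h, ih]; ring

theorem group_costs_py_eq (events : List (List (String × String))) :
    group_costs_py events = group_costs_py_alt events := by
  unfold group_costs_py group_costs_py_alt
  -- push the empty-rid skip into a filter on both sides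
  have hA :
      (events.foldl
        (fun (groups : PySem.Dict String (Int × Int)) evt =>
          if pvRid evt = "" then groups
          else
            groups.insert (pvRid evt)
              (if pvIsGlm evt then ((groups.getD (pvRid evt) (0, 0)).1, (groups.getD (pvRid evt) (0, 0)).2 + pvTot evt)
               else ((groups.getD (pvRid evt) (0, 0)).1 + pvTot evt, (groups.getD (pvRid evt) (0, 0)).2)))
        PySem.Dict.empty)
      = ((events.filter (fun e => !(pvRid e = ""))).foldl
          (fun (groups : PySem.Dict String (Int × Int)) evt =>
            groups.insert (pvRid evt)
              (if pvIsGlm evt then ((groups.getD (pvRid evt) (0, 0)).1, (groups.getD (pvRid evt) (0, 0)).2 + pvTot evt)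
               else ((groups.getD (pvRid evt) (0, 0)).1 + pvTot evt, (groups.getD (pvRid evt) (0, 0)).2)))
          PySem.Dict.empty) := by
    rw [List.foldl_filter]
    congr 1
    funext d e
    by_cases h : pvRid e = "" <;> simp [h]
  have hB :
      (events.foldl
        (fun (d : PySem.Dict String (List (List (String × String)))) evt =>
          if pvRid evt = "" then d else d.modify (pvRid evt) [] (· ++ [evt]))
        PySem.Dict.empty)
      = ((events.filter (fun e => !(pvRid e = ""))).foldl
          (fun (d : PySem.Dict String (List (List (String × String)))) evt =>
            d.modify (pvRid evt) [] (· ++ [evt]))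
          PySem.Dict.empty) := by
    rw [List.foldl_filter]
    congr 1
    funext d e
    by_cases h : pvRid e = "" <;> simp [h]
  simp only []
  rw [hA, hB]
  set l := events.filter (fun e => !(pvRid e = "")) with hl
  -- both dicts have the same Nodup key list
  have hkA := PySem.Dict.keys_foldl_insert_key (ν := Int × Int) l pvRid
    (fun groups evt =>
      (if pvIsGlm evt then ((groups.getD (pvRid evt) (0, 0)).1, (groups.getD (pvRid evt) (0, 0)).2 + pvTot evt)
       else ((groups.getD (pvRid evt) (0, 0)).1 + pvTot evt, (groups.getD (pvRid evt) (0, 0)).2)))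
    PySem.Dict.empty
  have hkB := PySem.Dict.keys_foldl_modify_key (ν := List (List (String × String))) l pvRid []
    (fun _ evt evs => evs ++ [evt]) PySem.Dict.empty
  have hndA := PySem.Dict.nodup_keys_foldl_insert_key (ν := Int × Int) l pvRid
    (fun groups evt =>
      (if pvIsGlm evt then ((groups.getD (pvRid evt) (0, 0)).1, (groups.getD (pvRid evt) (0, 0)).2 + pvTot evt)
       else ((groups.getD (pvRid evt) (0, 0)).1 + pvTot evt, (groups.getD (pvRid evt) (0, 0)).2)))
    PySem.Dict.empty (by simp)
  have hndB := PySem.Dict.nodup_keys_foldl_modify_key (ν := List (List (String × String))) l pvRid []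
    (fun _ evt evs => evs ++ [evt]) PySem.Dict.empty (by simp)
  rw [PySem.Dict.items_eq_map_keys _ hndA (0, 0), PySem.Dict.items_eq_map_keys _ hndB []]
  rw [hkA, hkB, List.map_map]
  apply List.map_congr_left
  intro k _
  simp only [Function.comp]
  rw [pv_getD_foldl_insert, pv_getD_foldl_modify, PySem.Dict.getD_empty, PySem.Dict.getD_empty]
  rw [pv_pairfold_eq_sums]
  simp

-- ===== VERDICT (by name: the statement is the Claim_ definition above) =====
theorem group_costs_py_spec : Claim_equal_group_costs_py := by
  intro events _
  unfold Spec_group_costs_py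
  exact group_costs_py_eq events
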